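-- pv_equiv track=rewrite | github.com/obsproject/loganalyzer | simplehttp.py | getSummaryHTML
-- ===== SOURCE A (Python) =====
-- def getSummaryHTML(messages):
--     """Helper func. Generates the summary secion of the HTML page."""
--     critical = ""
--     warning = ""
--     info = ""
--     for i in messages:
--         if (i[0] == 3):
--             critical = critical + """<p><a href="#""" + \
--                 i[1] + """"><button type="button" class="btn btn-danger">""" + \
--                 i[1] + "</button></a></p>\n"
--         elif (i[0] == 2):
--             warning = warning + """<p><a href="#""" + \
--                 i[1] + """"><button type="button" class="btn btn-warning">""" + \
--                 i[1] + "</button></a></p>\n"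
--         elif (i[0] == 1):
--             info = info + """<p><a href="#""" + \
--                 i[1] + """"><button type="button" class="btn btn-info">""" + \
--                 i[1] + "</button></a></p>\n"
--     if (len(critical) == 0):
--         critical = "No critical issues."
--     if (len(warning) == 0):
--         warning = "No warnings."
--     if (len(info) == 0):
--         info = "-"
--     return critical, warning, info
-- ===== SOURCE B (Python) =====
-- def getSummaryHTML(messages):
--     """Helper func. Generates the summary secion of the HTML page."""
--     def render(level, css_class, empty_text):
--         body = "".join(
--             '<p><a href="#' + text + '"><button type="button" class="btn btn-'
--             + css_class + '">' + text + '</button></a></p>\n'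
--             for lvl, text in messages if lvl == level
--         )
--         return body if body else empty_text
--     return (render(3, "danger", "No critical issues."),
--             render(2, "warning", "No warnings."),
--             render(1, "info", "-"))
-- ===== Notes on version B (the rewrite author's own statement) =====
-- stated objective: simpler
-- what changed: Replaces the single three-accumulator loop with a small render(level, css_class, empty_text) helper called three times, each doing a filtered join over the messages for one level.
import Mathlib
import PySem

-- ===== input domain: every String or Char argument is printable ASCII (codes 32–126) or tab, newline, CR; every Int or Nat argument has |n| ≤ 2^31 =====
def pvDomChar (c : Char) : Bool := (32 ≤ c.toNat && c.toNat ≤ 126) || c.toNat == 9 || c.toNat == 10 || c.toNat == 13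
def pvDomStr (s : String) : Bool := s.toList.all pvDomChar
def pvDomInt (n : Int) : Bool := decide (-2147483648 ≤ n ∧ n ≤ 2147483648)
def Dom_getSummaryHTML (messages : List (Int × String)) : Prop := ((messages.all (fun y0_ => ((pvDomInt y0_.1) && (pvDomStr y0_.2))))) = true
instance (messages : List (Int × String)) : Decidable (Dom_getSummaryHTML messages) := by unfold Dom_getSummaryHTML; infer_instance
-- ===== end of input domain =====

-- B replaces A's single three-accumulator loop by a render(level, css, empty) helper
-- applied three times over per-level filtered joins (simpler decomposition, same cost).


-- ===== PORT A =====
-- A's loop body: one step of the for-loop, threading (critical, warning, info).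
def pvStepA (acc : String × String × String) (i : Int × String) : String × String × String :=
  let (critical, warning, info) := acc
  if i.1 == 3 then
    (critical ++ "<p><a href=\"#" ++ i.2 ++ "\"><button type=\"button\" class=\"btn btn-danger\">" ++ i.2 ++ "</button></a></p>\n", warning, info)
  else if i.1 == 2 then
    (critical, warning ++ "<p><a href=\"#" ++ i.2 ++ "\"><button type=\"button\" class=\"btn btn-warning\">" ++ i.2 ++ "</button></a></p>\n", info)
  else if i.1 == 1 then
    (critical, warning, info ++ "<p><a href=\"#" ++ i.2 ++ "\"><button type=\"button\" class=\"btn btn-info\">" ++ i.2 ++ "</button></a></p>\n")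
  else acc

def getSummaryHTML (messages : List (Int × String)) : String × String × String :=
  let acc := messages.foldl pvStepA ("", "", "")
  let critical := if PySem.Str.len acc.1 == 0 then "No critical issues." else acc.1
  let warning := if PySem.Str.len acc.2.1 == 0 then "No warnings." else acc.2.1
  let info := if PySem.Str.len acc.2.2 == 0 then "-" else acc.2.2
  (critical, warning, info)

-- ===== PORT B =====
-- B's per-message HTML fragment.
def pvFrag (cssClass text : String) : String :=
  "<p><a href=\"#" ++ text ++ "\"><button type=\"button\" class=\"btn btn-" ++ cssClass ++ "\">" ++ text ++ "</button></a></p>\n"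

def pvRender (messages : List (Int × String)) (level : Int) (cssClass emptyText : String) : String :=
  let body := PySem.Str.join "" ((messages.filter (fun m => m.1 == level)).map (fun m => pvFrag cssClass m.2))
  if body == "" then emptyText else body

def getSummaryHTML_alt (messages : List (Int × String)) : String × String × String :=
  (pvRender messages 3 "danger" "No critical issues.",
   pvRender messages 2 "warning" "No warnings.",
   pvRender messages 1 "info" "-")

-- ===== PRECONDITION & SPEC =====
def Spec_getSummaryHTML (messages : List (Int × String)) (out : String × String × String) : Prop := out = getSummaryHTML_alt messages
instance (messages : List (Int × String)) (out : String × String × String) : Decidable (Spec_getSummaryHTML messages out) := by unfold Spec_getSummaryHTML; infer_instance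

-- ===== CLAIM (what is proved, stated in full; the proofs are below) =====
def Claim_equal_getSummaryHTML : Prop := ∀ (messages : List (Int × String)), Dom_getSummaryHTML messages → Spec_getSummaryHTML messages (getSummaryHTML messages)

-- ===== LEMMAS AND PROOFS =====

-- B's body for one level, as a function of the message list.
def pvBody (messages : List (Int × String)) (level : Int) (cssClass : String) : String :=
  PySem.Str.join "" ((messages.filter (fun m => m.1 == level)).map (fun m => pvFrag cssClass m.2))

theorem join_empty_cons (s : String) (l : List String) :
    PySem.Str.join "" (s :: l) = s ++ PySem.Str.join "" l := by
  apply String.toList_inj.mp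
  cases l
  all_goals simp [PySem.Str.toList_join, PySem.Chars.join, List.intercalate]

theorem pvBody_cons (m : Int × String) (ms : List (Int × String)) (level : Int) (css : String) :
    pvBody (m :: ms) level css =
      (if m.1 == level then pvFrag css m.2 else "") ++ pvBody ms level css := by
  unfold pvBody
  by_cases h : m.1 == level
  · simp [h, join_empty_cons]
  · simp [h]

theorem pvFold_inv (ms : List (Int × String)) :
    ∀ c w i : String, ms.foldl pvStepA (c, w, i) =
      (c ++ pvBody ms 3 "danger", w ++ pvBody ms 2 "warning", i ++ pvBody ms 1 "info") := by
  induction ms with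
  | nil => intro c w i; simp [pvBody, PySem.Str.join]
  | cons m ms ih =>
    intro c w i
    simp only [List.foldl_cons, pvBody_cons, ih]
    unfold pvStepA
    by_cases h3 : m.1 == 3
    · have e : m.1 = 3 := by simpa using h3
      simp [e, pvFrag, String.append_assoc]
    · by_cases h2 : m.1 == 2
      · have e : m.1 = 2 := by simpa using h2
        simp [e, pvFrag, String.append_assoc]
      · by_cases h1 : m.1 == 1
        · have e : m.1 = 1 := by simpa using h1
          simp [e, pvFrag, String.append_assoc]
        · simp [h3, h2, h1]

theorem len_eq_zero (s : String) : (PySem.Str.len s == 0) = (s == "") := by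
  rcases s with ⟨l⟩
  cases l
  all_goals simp [PySem.Str.len_eq]

-- ===== VERDICT (by name: the statement is the Claim_ definition above) =====
theorem getSummaryHTML_spec : Claim_equal_getSummaryHTML := by
  intro messages _
  unfold Spec_getSummaryHTML getSummaryHTML getSummaryHTML_alt pvRender
  rw [pvFold_inv messages "" "" ""]
  simp only [len_eq_zero, String.empty_append]
  rfl
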